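-- pv_equiv track=rewrite | github.com/ilkka-torma/gol-preim | patfinder.py | linesort
-- ===== SOURCE A (Python) =====
-- def nbors(vec):
--     x,y = vec
--     yield (x-1,y-1)
--     yield (x-1,y)
--     yield (x-1,y+1)
--     yield (x,y-1)
--     yield (x,y+1)
--     yield (x+1,y-1)
--     yield (x+1,y)
--     yield (x+1,y+1)
--
-- def dist(v1,v2):
--     if v1 is None or v2 is None:
--         return None
--     x,y = v1
--     i,j = v2
--     dx = abs(x-i)
--     dy = abs(y-j)
--     return 2*max(dx,dy) + min(dx,dy)
--
-- def linesort(line, start):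
--     line = line[:]
--     line.sort(key=lambda v: (sum(1 for w in line if w in nbors(v)), v))
--     cur = old =  line.pop()
--     new = [cur]
--     while line:
--         nbrs = list(v for v in line if v in nbors(cur))
--         if nbrs:
--             vec = min(nbrs, key=lambda v: (dist(v,cur), dist(v,old)))
--             old, cur = cur, vec
--         else:
--             vec = min(line, key=lambda v: sum(1 for w in line if w in nbors(v)))
--             old = cur = vec
--         line.remove(vec)
--         new.append(vec)
--     return new
-- ===== SOURCE B (Python) =====
-- # Faster linesort: a counter dict keyed by cell gives O(1) neighbor probes and
-- # O(#distinct) fallback scans, replacing A's per-step list filters and counts.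
-- # (Note: CPython detaches the list during list.sort, so A's sort key count term
-- # is always 0 -- the initial sort is by coordinate only, reproduced here.)
--
-- def _nb(v):
--     x, y = v
--     return ((x-1, y-1), (x-1, y), (x-1, y+1), (x, y-1),
--             (x, y+1), (x+1, y-1), (x+1, y), (x+1, y+1))
--
-- def _dist(v1, v2):
--     dx = abs(v1[0] - v2[0])
--     dy = abs(v1[1] - v2[1])
--     return 2 * max(dx, dy) + min(dx, dy)
--
-- def _take(cnt, v):
--     if cnt[v] == 1:
--         del cnt[v]
--     else:
--         cnt[v] -= 1
--
-- def linesort(line, start):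
--     cnt = {}
--     for v in sorted(line):          # keys stay in ascending order throughout
--         cnt[v] = cnt.get(v, 0) + 1
--     cur = old = next(reversed(cnt))  # largest cell
--     _take(cnt, cur)
--     new = [cur]
--     for _ in range(len(line) - 1):
--         cand = [w for w in _nb(cur) if w in cnt]
--         if cand:
--             vec = min(cand, key=lambda v: (_dist(v, cur), _dist(v, old)))
--             old, cur = cur, vec
--         else:
--             vec = min(cnt, key=lambda v: sum(cnt.get(w, 0) for w in _nb(v)))
--             old = cur = vec
--         _take(cnt, vec)
--         new.append(vec)
--     return new
-- ===== Notes on version B (the rewrite author's own statement) =====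
-- stated objective: faster
-- what changed: Replaces A's per-step list scans (filtering the remaining list for neighbours and re-counting neighbours of every cell by a nested scan) with a counter dict keyed by cell, so each step probes the 8 neighbour coordinates in O(1) and the no-neighbour fallback scans only the distinct keys with 8 O(1) lookups each.
import Mathlib
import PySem

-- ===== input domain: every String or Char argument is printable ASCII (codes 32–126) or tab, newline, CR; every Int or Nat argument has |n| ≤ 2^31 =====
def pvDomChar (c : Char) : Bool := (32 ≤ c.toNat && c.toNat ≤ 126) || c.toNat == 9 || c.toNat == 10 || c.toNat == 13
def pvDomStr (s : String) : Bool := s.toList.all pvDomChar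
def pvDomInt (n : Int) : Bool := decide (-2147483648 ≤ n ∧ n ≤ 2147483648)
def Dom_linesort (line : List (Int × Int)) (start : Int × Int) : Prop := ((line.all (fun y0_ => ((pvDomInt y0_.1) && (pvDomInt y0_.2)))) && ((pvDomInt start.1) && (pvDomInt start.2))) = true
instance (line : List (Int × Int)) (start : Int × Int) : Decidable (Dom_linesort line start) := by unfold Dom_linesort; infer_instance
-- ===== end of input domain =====

-- B replaces A's per-step scans of the remaining list by a counter dict keyed by cell
-- (O(1) neighbour probes, fallback scan over distinct keys only); return values agree on
-- every non-empty input (A raises IndexError on the empty list, excluded by Pre_).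

-- ===== PORT A =====
-- module helper nbors(vec) (its 8 yields, in order)
def nborsList (v : Int × Int) : List (Int × Int) :=
  [(v.1-1, v.2-1), (v.1-1, v.2), (v.1-1, v.2+1), (v.1, v.2-1),
   (v.1, v.2+1), (v.1+1, v.2-1), (v.1+1, v.2), (v.1+1, v.2+1)]

-- module helper dist(v1,v2); its None branch is never reached in linesort (both arguments
-- are always cells), so it is ported as the Int it returns there
def pdist (v1 v2 : Int × Int) : Int :=
  2 * max |v1.1 - v2.1| |v1.2 - v2.2| + min |v1.1 - v2.1| |v1.2 - v2.2|

-- Python's '<' on (int,int) tuples is lexicographic; Mathlib's Prod '<' is the pointwise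
-- order, so the tuple comparison is ported by hand (exact for int pairs)
def pairLt (a b : Int × Int) : Bool :=
  decide (a.1 < b.1) || (decide (a.1 = b.1) && decide (a.2 < b.2))

-- the count term of A's sort key: CPython detaches the list during list.sort, so inside
-- the key lambda `line` is the empty list and the sum runs over [] — ported literally
def keyCntA (v : Int × Int) : Nat :=
  (([] : List (Int × Int)).filter (fun w => decide (w ∈ nborsList v))).length

-- 'a < b' on A's tuple key (count, v): lexicographic, by hand as above
def sortKeyLtA (a b : Int × Int) : Bool :=
  decide (keyCntA a < keyCntA b) || (decide (keyCntA a = keyCntA b) && pairLt a b)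

-- the while loop of A; fuel = line.length (each pass removes exactly one element)
def loopA : Nat → List (Int × Int) → Int × Int → Int × Int → List (Int × Int) → List (Int × Int)
  | _, [], _, _, acc => acc                -- while line: — loop ends
  | 0, _ :: _, _, _, acc => acc            -- never reached (fuel = length)
  | fuel+1, l, cur, old, acc =>
      let nbrs := l.filter (fun v => decide (v ∈ nborsList cur))
      if nbrs ≠ [] then
        match PySem.List.min2? nbrs (fun v => pdist v cur) (fun v => pdist v old) with
        | none => acc                      -- never reached (nbrs ≠ [])
        | some vec =>
          match PySem.List.remove? l vec with
          | none => acc                    -- never reached (vec ∈ l)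
          | some l' => loopA fuel l' vec cur (acc ++ [vec])
      else
        match PySem.List.min? l (fun v => l.countP (fun w => decide (w ∈ nborsList v))) with
        | none => acc                      -- never reached (l ≠ [])
        | some vec =>
          match PySem.List.remove? l vec with
          | none => acc                    -- never reached (vec ∈ l)
          | some l' => loopA fuel l' vec vec (acc ++ [vec])

def linesort (line : List (Int × Int)) (start : Int × Int) : List (Int × Int) :=
  -- line.sort(key=…): PySem's stable insertion sort (sorted_eq_foldl_insertBy), with the
  -- tuple key comparison hand-ported as sortKeyLtA
  let l := line.foldl (fun acc x => PySem.List.insertBy sortKeyLtA x acc) []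
  match PySem.List.pop? l with
  | none => []                             -- line.pop() raises IndexError: excluded by Pre_
  | some (cur, rest) => loopA rest.length rest cur cur [cur]

-- ===== PORT B =====
-- Source B _take(cnt, v): cnt[v] == 1 → del cnt[v], else cnt[v] -= 1
def takeB (cnt : PySem.Dict (Int × Int) Int) (v : Int × Int) : PySem.Dict (Int × Int) Int :=
  match cnt.get? v with
  | none => cnt                            -- KeyError: _take is only called on present keys
  | some c => if c = 1 then cnt.erase v else cnt.insert v (c - 1)

-- the for loop of Source B, running len(line) - 1 times
def loopB : Nat → PySem.Dict (Int × Int) Int → Int × Int → Int × Int → List (Int × Int) → List (Int × Int)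
  | 0, _, _, _, acc => acc
  | k+1, cnt, cur, old, acc =>
      let cand := (nborsList cur).filter (fun w => cnt.contains w)
      if cand ≠ [] then
        match PySem.List.min2? cand (fun v => pdist v cur) (fun v => pdist v old) with
        | none => acc                      -- never reached (cand ≠ [])
        | some vec => loopB k (takeB cnt vec) vec cur (acc ++ [vec])
      else
        match PySem.List.min? cnt.keys (fun v => ((nborsList v).map (fun w => cnt.getD w 0)).sum) with
        | none => acc                      -- min() over an empty dict: never reached
        | some vec => loopB k (takeB cnt vec) vec vec (acc ++ [vec])

def linesort_alt (line : List (Int × Int)) (start : Int × Int) : List (Int × Int) :=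
  -- sorted(line): plain tuple order, hand-ported comparison as for A's sort
  let sl := line.foldl (fun acc x => PySem.List.insertBy pairLt x acc) []
  -- cnt[v] = cnt.get(v, 0) + 1 over the sorted list: keys stay in ascending order
  let cnt := sl.foldl (fun d v => d.insert v (d.getD v 0 + 1)) PySem.Dict.empty
  match cnt.keys.getLast? with
  | none => []                             -- next(reversed(cnt)) raises StopIteration: excluded by Pre_
  | some cur => loopB (line.length - 1) (takeB cnt cur) cur cur [cur]

-- ===== PRECONDITION & SPEC =====
-- Pre_ excludes only the empty list, on which A raises IndexError (and B StopIteration)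
def Pre_linesort (line : List (Int × Int)) (start : Int × Int) : Prop := line ≠ []
instance (line : List (Int × Int)) (start : Int × Int) : Decidable (Pre_linesort line start) := by unfold Pre_linesort; infer_instance
def pvWitness_linesort : (List (Int × Int)) × (Int × Int) := ([(0, 0), (1, 1)], (0, 0))

def Spec_linesort (line : List (Int × Int)) (start : Int × Int) (out : List (Int × Int)) : Prop := out = linesort_alt line start
instance (line : List (Int × Int)) (start : Int × Int) (out : List (Int × Int)) : Decidable (Spec_linesort line start out) := by unfold Spec_linesort; infer_instance

-- ===== CLAIM (what is proved, stated in full; the proofs are below) =====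
def Claim_equal_linesort : Prop := ∀ (line : List (Int × Int)) (start : Int × Int), Dom_linesort line start → Pre_linesort line start → Spec_linesort line start (linesort line start)

-- ===== LEMMAS AND PROOFS =====

-- A's sort comparison collapses to the plain tuple order (the count term is a count over [])
lemma sortKeyLtA_eq_pairLt : sortKeyLtA = pairLt := by
  funext a b; simp [sortKeyLtA, keyCntA]

-- lexicographic order on int pairs, as Props
def pLt (a b : Int × Int) : Prop := a.1 < b.1 ∨ (a.1 = b.1 ∧ a.2 < b.2)
def pLe (a b : Int × Int) : Prop := a.1 < b.1 ∨ (a.1 = b.1 ∧ a.2 ≤ b.2)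

lemma pLt_iff_pairLt {a b : Int × Int} : pLt a b ↔ pairLt a b = true := by
  simp [pLt, pairLt]

lemma pLe_of_not_pairLt {a b : Int × Int} (h : pairLt a b = false) : pLe b a := by
  simp [pairLt] at h; simp [pLe]; omega

lemma pLe_refl (a : Int × Int) : pLe a a := by simp [pLe]

lemma pLe_trans {a b c : Int × Int} (h1 : pLe a b) (h2 : pLe b c) : pLe a c := by
  simp [pLe] at *; omega

lemma pLe_antisymm {a b : Int × Int} (h1 : pLe a b) (h2 : pLe b a) : a = b := by
  obtain ⟨a1, a2⟩ := a; obtain ⟨b1, b2⟩ := b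
  simp [pLe] at *; omega

lemma pLt_of_pLe_of_ne {a b : Int × Int} (h1 : pLe a b) (h2 : a ≠ b) : pLt a b := by
  obtain ⟨a1, a2⟩ := a; obtain ⟨b1, b2⟩ := b
  simp [pLe, pLt] at *; omega

lemma pLe_of_pLt {a b : Int × Int} (h : pLt a b) : pLe a b := by
  simp [pLt, pLe] at *; omega

lemma pLt_ne {a b : Int × Int} (h : pLt a b) : a ≠ b := by
  obtain ⟨a1, a2⟩ := a; obtain ⟨b1, b2⟩ := b
  simp [pLt] at *; omega

-- ---- insertion sort facts ----

lemma insertBy_perm (x : Int × Int) (ys : List (Int × Int)) :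
    List.Perm (PySem.List.insertBy pairLt x ys) (x :: ys) := by
  induction ys with
  | nil => simp [PySem.List.insertBy]
  | cons y t ih =>
    rw [PySem.List.insertBy]
    split
    · exact List.Perm.refl _
    · exact (ih.cons y).trans (List.Perm.swap x y t)

lemma insertBy_sorted (x : Int × Int) (ys : List (Int × Int)) (h : ys.Pairwise pLe) :
    (PySem.List.insertBy pairLt x ys).Pairwise pLe := by
  induction ys with
  | nil => simp [PySem.List.insertBy]
  | cons y t ih =>
    rw [PySem.List.insertBy]
    rcases List.pairwise_cons.mp h with ⟨hy, ht⟩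
    split
    · rename_i hlt
      have hxy : pLe x y := pLe_of_pLt (pLt_iff_pairLt.mpr hlt)
      refine List.pairwise_cons.mpr ⟨?_, h⟩
      intro z hz
      rcases List.mem_cons.mp hz with rfl | hz
      · exact hxy
      · exact pLe_trans hxy (hy _ hz)
    · rename_i hnlt
      have hyx : pLe y x := pLe_of_not_pairLt (by simpa using hnlt)
      refine List.pairwise_cons.mpr ⟨?_, ih ht⟩
      intro z hz
      rcases (PySem.List.mem_insertBy _ _ _ _).mp hz with rfl | hz
      · exact hyx
      · exact hy _ hz

lemma foldl_insertBy_perm (l acc : List (Int × Int)) :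
    List.Perm (l.foldl (fun acc x => PySem.List.insertBy pairLt x acc) acc) (l ++ acc) := by
  induction l generalizing acc with
  | nil => simp
  | cons x t ih =>
    simp only [List.foldl_cons]
    refine (ih _).trans ?_
    have h1 : List.Perm (t ++ PySem.List.insertBy pairLt x acc) (t ++ (x :: acc)) :=
      List.Perm.append_left t (insertBy_perm x acc)
    exact h1.trans List.perm_middle

lemma foldl_insertBy_sorted (l acc : List (Int × Int)) (h : acc.Pairwise pLe) :
    (l.foldl (fun acc x => PySem.List.insertBy pairLt x acc) acc).Pairwise pLe := by
  induction l generalizing acc with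
  | nil => simpa
  | cons x t ih => exact ih _ (insertBy_sorted x acc h)

-- ---- the counter invariant ----

def CntInv (rem : List (Int × Int)) (cnt : PySem.Dict (Int × Int) Int) : Prop :=
  rem.Pairwise pLe ∧ cnt.keys.Pairwise pLt ∧
    ∀ v, cnt.get? v = if rem.count v = 0 then none else some ((rem.count v : Int))

lemma CntInv.contains_eq {rem cnt} (h : CntInv rem cnt) (v : Int × Int) :
    cnt.contains v = decide (v ∈ rem) := by
  rw [PySem.Dict.contains_eq_isSome_get?, h.2.2 v]
  by_cases hv : v ∈ rem
  · have : rem.count v ≠ 0 := by simpa [List.count_eq_zero] using hv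
    simp [this, hv]
  · have : rem.count v = 0 := by simpa [List.count_eq_zero] using hv
    simp [this, hv]

lemma CntInv.getD_eq {rem cnt} (h : CntInv rem cnt) (v : Int × Int) :
    cnt.getD v 0 = (rem.count v : Int) := by
  rw [PySem.Dict.getD_eq_get?_getD, h.2.2 v]
  by_cases hv : rem.count v = 0 <;> simp [hv]

lemma CntInv.mem_keys_iff {rem cnt} (h : CntInv rem cnt) (v : Int × Int) :
    v ∈ cnt.keys ↔ v ∈ rem := by
  rw [← PySem.Dict.contains_iff_mem_keys, h.contains_eq v]
  simp

-- hand facts about Dict.erase (items-level; not in the PySem lemma book)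
lemma dict_get?_erase (d : PySem.Dict (Int × Int) Int) (k j : Int × Int) :
    (d.erase k).get? j = if j = k then none else d.get? j := by
  obtain ⟨items⟩ := d
  induction items with
  | nil => simp [PySem.Dict.erase, PySem.Dict.get?]
  | cons p t ih =>
    simp only [PySem.Dict.erase, PySem.Dict.get?, List.filter_cons] at *
    by_cases hpk : p.1 = k <;> by_cases hpj : p.1 = j <;>
      simp_all [List.find?_cons, beq_iff_eq] <;> split_ifs <;> simp_all

lemma dict_keys_erase (d : PySem.Dict (Int × Int) Int) (k : Int × Int) :
    (d.erase k).keys = d.keys.filter (fun x => !(x == k)) := by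
  obtain ⟨items⟩ := d
  simp only [PySem.Dict.erase, PySem.Dict.keys]
  induction items with
  | nil => simp
  | cons p t ih => by_cases hpk : p.1 = k <;> simp_all [List.filter_cons]

lemma CntInv_take {rem cnt} (h : CntInv rem cnt) {v : Int × Int} (hv : v ∈ rem) :
    CntInv (rem.erase v) (takeB cnt v) := by
  have hcount : rem.count v ≠ 0 := by simpa [List.count_eq_zero] using hv
  have hget : cnt.get? v = some ((rem.count v : Int)) := by rw [h.2.2 v]; simp [hcount]
  have hsorted : (rem.erase v).Pairwise pLe := List.Pairwise.sublist List.erase_sublist h.1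
  have heq : takeB cnt v = if ((rem.count v : Int)) = 1 then cnt.erase v
      else cnt.insert v ((rem.count v : Int) - 1) := by
    unfold takeB; rw [hget]
  rw [heq]
  by_cases hone : rem.count v = 1
  · -- del cnt[v]
    have : ((rem.count v : Int)) = 1 := by rw [hone]; rfl
    rw [if_pos this]
    refine ⟨hsorted, ?_, ?_⟩
    · rw [dict_keys_erase]; exact h.2.1.filter _
    · intro j
      rw [dict_get?_erase]
      by_cases hj : j = v
      · subst hj; simp [List.count_erase_self, hone]
      · rw [if_neg hj, h.2.2 j, List.count_erase_of_ne hj]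
  · -- cnt[v] -= 1
    have hne1 : ((rem.count v : Int)) ≠ 1 := by
      intro hc; exact hone (by exact_mod_cast hc)
    rw [if_neg hne1]
    have hcont : cnt.contains v = true := by rw [h.contains_eq v]; simpa using hv
    refine ⟨hsorted, ?_, ?_⟩
    · rw [PySem.Dict.keys_insert_of_contains _ _ hcont]; exact h.2.1
    · intro j
      rw [PySem.Dict.get?_insert]
      by_cases hj : j = v
      · subst hj
        have h1 : 1 ≤ rem.count j := Nat.one_le_iff_ne_zero.mpr hcount
        have h2 : rem.count j ≠ 1 := hone
        rw [if_pos rfl, List.count_erase_self]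
        have : (rem.count j : Nat) - 1 ≠ 0 := by omega
        simp only [this, if_neg this]
        congr 1
        push_cast [Nat.cast_sub h1]
        ring
      · rw [if_neg hj, h.2.2 j, List.count_erase_of_ne hj]

-- ---- characterisation of Python's min(…, key=(k1, k2)) on a sorted list ----

def klt (k1 k2 : Int × Int → Int) (a b : Int × Int) : Prop :=
  k1 a < k1 b ∨ (k1 a = k1 b ∧ k2 a < k2 b)

def kmin (k1 k2 : Int × Int → Int) (m : Int × Int) (l : List (Int × Int)) : Prop :=
  ∀ y ∈ l, klt k1 k2 m y ∨ (k1 m = k1 y ∧ k2 m = k2 y ∧ pLe m y)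

lemma min2?_step_iff (k1 k2 : Int × Int → Int) (x m : Int × Int) :
    (decide (k1 x < k1 m) || (!decide (k1 m < k1 x) && decide (k2 x < k2 m))) = true
      ↔ klt k1 k2 x m := by
  simp only [klt, Bool.or_eq_true, Bool.and_eq_true, Bool.not_eq_true', decide_eq_true_eq,
    decide_eq_false_iff_not]
  omega

lemma min2?_cons_cons_lt (k1 k2 : Int × Int → Int) (m x : Int × Int) (t : List (Int × Int))
    (h : klt k1 k2 x m) :
    PySem.List.min2? (m :: x :: t) k1 k2 = PySem.List.min2? (x :: t) k1 k2 := by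
  simp only [PySem.List.min2?, List.foldl_cons]
  congr 1
  simp [min2?_step_iff k1 k2 x m, h]

lemma min2?_cons_cons_ge (k1 k2 : Int × Int → Int) (m x : Int × Int) (t : List (Int × Int))
    (h : ¬ klt k1 k2 x m) :
    PySem.List.min2? (m :: x :: t) k1 k2 = PySem.List.min2? (m :: t) k1 k2 := by
  simp only [PySem.List.min2?, List.foldl_cons]
  congr 1
  simp [min2?_step_iff k1 k2 x m, h]

lemma min2?_cons_isSome (k1 k2 : Int × Int → Int) (m : Int × Int) (t : List (Int × Int)) :
    ∃ m', PySem.List.min2? (m :: t) k1 k2 = some m' := by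
  induction t generalizing m with
  | nil => exact ⟨m, rfl⟩
  | cons x u ih =>
    by_cases h : klt k1 k2 x m
    · rw [min2?_cons_cons_lt _ _ _ _ _ h]; exact ih x
    · rw [min2?_cons_cons_ge _ _ _ _ _ h]; exact ih m

lemma min2?_eq_none_iff' (k1 k2 : Int × Int → Int) (l : List (Int × Int)) :
    PySem.List.min2? l k1 k2 = none ↔ l = [] := by
  cases l with
  | nil => exact ⟨fun _ => rfl, fun _ => rfl⟩
  | cons x t =>
    obtain ⟨m', hm'⟩ := min2?_cons_isSome k1 k2 x t
    rw [hm']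
    simp

lemma min2?_go (k1 k2 : Int × Int → Int) (l : List (Int × Int)) :
    ∀ (m : Int × Int), l.Pairwise pLe → (∀ y ∈ l, pLe m y) →
    ∃ m', PySem.List.min2? (m :: l) k1 k2 = some m'
      ∧ (m' = m ∨ m' ∈ l) ∧ kmin k1 k2 m' (m :: l) := by
  induction l with
  | nil =>
    intro m hs hm
    refine ⟨m, rfl, Or.inl rfl, ?_⟩
    intro y hy
    rw [List.mem_singleton] at hy; subst hy
    exact Or.inr ⟨rfl, rfl, pLe_refl _⟩
  | cons x t ih =>
    intro m hs hm
    rcases List.pairwise_cons.mp hs with ⟨hxt, hts⟩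
    by_cases hlt : klt k1 k2 x m
    · rw [min2?_cons_cons_lt _ _ _ _ _ hlt]
      obtain ⟨m', heq, hmem, hkm⟩ := ih x hts hxt
      refine ⟨m', heq, ?_, ?_⟩
      · rcases hmem with rfl | hmem
        · exact Or.inr List.mem_cons_self
        · exact Or.inr (List.mem_cons_of_mem _ hmem)
      · intro y hy
        rcases List.mem_cons.mp hy with rfl | hy
        · -- y = m : m' ≤K x <K m
          have hx := hkm x List.mem_cons_self
          simp only [klt] at *
          rcases hx with hx | hx <;> rcases hlt with hlt | hlt <;> exact Or.inl (by omega)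
        · exact hkm y hy
    · rw [min2?_cons_cons_ge _ _ _ _ _ hlt]
      have hmt : ∀ y ∈ t, pLe m y := fun y hy => hm y (List.mem_cons_of_mem _ hy)
      obtain ⟨m', heq, hmem, hkm⟩ := ih m hts hmt
      refine ⟨m', heq, ?_, ?_⟩
      · rcases hmem with rfl | hmem
        · exact Or.inl rfl
        · exact Or.inr (List.mem_cons_of_mem _ hmem)
      · intro y hy
        rcases List.mem_cons.mp hy with rfl | hy
        · exact hkm y List.mem_cons_self
        rcases List.mem_cons.mp hy with rfl | hy
        · -- y = x, with ¬ klt x m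
          have hmm := hkm m List.mem_cons_self
          have hmx : pLe m y := hm y List.mem_cons_self
          simp only [klt] at *
          rcases hmm with hmm | hmm
          · exact Or.inl (by omega)
          · by_cases h1 : k1 m' < k1 y
            · exact Or.inl (Or.inl h1)
            · by_cases h2 : k1 m' = k1 y ∧ k2 m' < k2 y
              · exact Or.inl (Or.inr h2)
              · exact Or.inr ⟨by omega, by omega, pLe_trans hmm.2.2 hmx⟩
        · exact hkm y (List.mem_cons_of_mem _ hy)

lemma min2?_char (k1 k2 : Int × Int → Int) (l : List (Int × Int)) (m : Int × Int)
    (hs : l.Pairwise pLe) (h : PySem.List.min2? l k1 k2 = some m) :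
    m ∈ l ∧ kmin k1 k2 m l := by
  cases l with
  | nil => cases h
  | cons x t =>
    rcases List.pairwise_cons.mp hs with ⟨hxt, hts⟩
    obtain ⟨m', heq, hmem, hkm⟩ := min2?_go k1 k2 t x hts hxt
    rw [heq] at h
    injection h with h; subst h
    constructor
    · rcases hmem with rfl | hmem
      · exact List.mem_cons_self
      · exact List.mem_cons_of_mem _ hmem
    · exact hkm

lemma min2?_eq_of_sorted (k1 k2 : Int × Int → Int) (l1 l2 : List (Int × Int))
    (h1 : l1.Pairwise pLe) (h2 : l2.Pairwise pLe)
    (hmem : ∀ x, x ∈ l1 ↔ x ∈ l2) :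
    PySem.List.min2? l1 k1 k2 = PySem.List.min2? l2 k1 k2 := by
  cases hl1 : l1 with
  | nil =>
    have h0 : l2 = [] := by
      rw [List.eq_nil_iff_forall_not_mem]
      intro x hx
      exact (List.not_mem_nil (a := x)) (hl1 ▸ ((hmem x).mpr hx))
    rw [h0]
  | cons a t =>
    rw [← hl1]
    have hne1 : l1 ≠ [] := by simp [hl1]
    have hne2 : l2 ≠ [] := by
      intro h0; rw [h0] at hmem
      exact (List.not_mem_nil (a := a)) ((hmem a).mp (hl1 ▸ List.mem_cons_self))
    obtain ⟨m1, hm1⟩ : ∃ m, PySem.List.min2? l1 k1 k2 = some m := by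
      cases hh : PySem.List.min2? l1 k1 k2 with
      | none => exact absurd ((min2?_eq_none_iff' k1 k2 l1).mp hh) hne1
      | some m => exact ⟨m, rfl⟩
    obtain ⟨m2, hm2⟩ : ∃ m, PySem.List.min2? l2 k1 k2 = some m := by
      cases hh : PySem.List.min2? l2 k1 k2 with
      | none => exact absurd ((min2?_eq_none_iff' k1 k2 l2).mp hh) hne2
      | some m => exact ⟨m, rfl⟩
    obtain ⟨hmem1, hkm1⟩ := min2?_char k1 k2 l1 m1 h1 hm1
    obtain ⟨hmem2, hkm2⟩ := min2?_char k1 k2 l2 m2 h2 hm2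
    have ha := hkm1 m2 ((hmem m2).mpr hmem2)
    have hb := hkm2 m1 ((hmem m1).mp hmem1)
    have heq12 : m1 = m2 := by
      simp only [klt] at ha hb
      rcases ha with ha | ha <;> rcases hb with hb | hb
      · exact absurd ha (by omega)
      · exact absurd ha (by omega)
      · exact absurd hb (by omega)
      · exact pLe_antisymm ha.2.2 hb.2.2
    rw [hm1, hm2, heq12]

-- min(…) with a single key as min2? with a constant second key
lemma min?_eq_min2?_int (l : List (Int × Int)) (key : Int × Int → Int) :
    PySem.List.min? l key = PySem.List.min2? l key (fun _ => (0 : Int)) := by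
  simp only [PySem.List.min?, PySem.List.min2?]
  congr 1
  funext acc x
  cases acc with
  | none => rfl
  | some m => by_cases h : key x < key m <;> simp [h] <;> omega

lemma min?_nat_int (l : List (Int × Int)) (f : Int × Int → Nat) :
    PySem.List.min? l (fun v => f v) = PySem.List.min? l (fun v => ((f v : Nat) : Int)) := by
  simp only [PySem.List.min?]
  congr 1
  funext acc x
  cases acc with
  | none => rfl
  | some m =>
    have : (f x < f m) = (((f x : Nat) : Int) < ((f m : Nat) : Int)) := by
      simp
    by_cases h : f x < f m
    · simp [h, (by exact_mod_cast h : ((f x : Nat) : Int) < ((f m : Nat) : Int))]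
    · simp [h, (by exact_mod_cast h : ¬ ((f x : Nat) : Int) < ((f m : Nat) : Int))]

-- ---- counting: a sum of counts over distinct cells is a countP ----

lemma sum_map_ite_one (S : List (Int × Int)) (x : Int × Int) (hS : S.Nodup) :
    (S.map (fun w => if w = x then (1 : Int) else 0)).sum = if x ∈ S then (1 : Int) else 0 := by
  induction S with
  | nil => simp
  | cons s t ih =>
    rcases List.nodup_cons.mp hS with ⟨hs, ht⟩
    by_cases hsx : s = x
    · subst hsx
      simp only [List.map_cons, List.sum_cons, if_pos rfl, if_pos List.mem_cons_self]
      have : (t.map (fun w => if w = s then (1 : Int) else 0)).sum = 0 := by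
        rw [List.sum_eq_zero]
        intro y hy
        simp only [List.mem_map] at hy
        obtain ⟨w, hw, rfl⟩ := hy
        rw [if_neg (by rintro rfl; exact hs hw)]
      rw [this]
      simp
    · simp only [List.map_cons, List.sum_cons, if_neg hsx, ih ht, zero_add,
        List.mem_cons]
      by_cases hx : x ∈ t
      · rw [if_pos hx, if_pos (Or.inr hx)]
      · rw [if_neg hx, if_neg (by rintro (rfl | h) <;> [exact hsx rfl; exact hx h])]

lemma countP_eq_sum_counts (S l : List (Int × Int)) (hS : S.Nodup) :
    (S.map (fun w => ((l.count w : Nat) : Int))).sum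
      = ((l.countP (fun w => decide (w ∈ S)) : Nat) : Int) := by
  induction l with
  | nil => simp
  | cons x t ih =>
    have hstep : ∀ w : Int × Int, ((((x :: t).count w : Nat)) : Int)
        = ((t.count w : Nat) : Int) + (if w = x then (1 : Int) else 0) := by
      intro w
      by_cases hw : w = x
      · subst hw; rw [List.count_cons_self, if_pos rfl]; push_cast; ring
      · rw [List.count_cons_of_ne (Ne.symm hw), if_neg hw]; ring
    calc (S.map (fun w => (((x :: t).count w : Nat) : Int))).sum
        = (S.map (fun w => ((t.count w : Nat) : Int) + (if w = x then (1 : Int) else 0))).sum := by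
          congr 1; exact List.map_congr_left (fun w _ => hstep w)
      _ = (S.map (fun w => ((t.count w : Nat) : Int))).sum
            + (S.map (fun w => if w = x then (1 : Int) else 0)).sum := by
          rw [← List.sum_map_add]
      _ = ((t.countP (fun w => decide (w ∈ S)) : Nat) : Int) + (if x ∈ S then (1 : Int) else 0) := by
          rw [ih, sum_map_ite_one S x hS]
      _ = (((x :: t).countP (fun w => decide (w ∈ S)) : Nat) : Int) := by
          rw [List.countP_cons]
          by_cases hx : x ∈ S
          · have hd : decide (x ∈ S) = true := by simpa using hx
            simp [hd, hx]
          · have hd : decide (x ∈ S) = false := by simpa using hx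
            simp [hd, hx]

-- ---- geometry of the neighbour list ----

lemma nbors_pairwise (v : Int × Int) : (nborsList v).Pairwise pLt := by
  simp only [nborsList, List.pairwise_cons, List.mem_cons, List.mem_singleton,
    List.not_mem_nil, List.Pairwise.nil, and_true, pLt]
  norm_num

lemma nbors_nodup (v : Int × Int) : (nborsList v).Nodup :=
  List.Pairwise.imp (fun h => pLt_ne h) (nbors_pairwise v)

lemma nbors_sorted (v : Int × Int) : (nborsList v).Pairwise pLe :=
  List.Pairwise.imp (fun h => pLe_of_pLt h) (nbors_pairwise v)

-- ---- the two loops agree ----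

lemma loop_eq (k : Nat) : ∀ (rem : List (Int × Int)) (cnt : PySem.Dict (Int × Int) Int)
    (cur old : Int × Int) (acc : List (Int × Int)),
    CntInv rem cnt → rem.length = k →
    loopA k rem cur old acc = loopB k cnt cur old acc := by
  induction k with
  | zero =>
    intro rem cnt cur old acc hinv hlen
    rw [List.length_eq_zero_iff.mp hlen]
    rfl
  | succ k ih =>
    intro rem cnt cur old acc hinv hlen
    cases rem with
    | nil => simp at hlen
    | cons r t =>
      simp only [loopA, loopB]
      have hmemiff : ∀ x, (x ∈ (r :: t).filter (fun v => decide (v ∈ nborsList cur))) ↔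
          x ∈ (nborsList cur).filter (fun w => cnt.contains w) := by
        intro x
        simp only [List.mem_filter, decide_eq_true_eq, hinv.contains_eq]
        tauto
      by_cases hn : (r :: t).filter (fun v => decide (v ∈ nborsList cur)) = []
      · -- fallback branch: no neighbour of cur remains
        have hc : (nborsList cur).filter (fun w => cnt.contains w) = [] := by
          rw [List.eq_nil_iff_forall_not_mem]
          intro x hx
          rw [List.eq_nil_iff_forall_not_mem] at hn
          exact hn x ((hmemiff x).mpr hx)
        rw [if_neg (fun h => h hn), if_neg (fun h => h hc)]
        have hchain : PySem.List.min? (r :: t)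
              (fun v => (r :: t).countP (fun w => decide (w ∈ nborsList v)))
            = PySem.List.min? cnt.keys
              (fun v => ((nborsList v).map (fun w => cnt.getD w 0)).sum) := by
          rw [min?_nat_int, min?_eq_min2?_int, min?_eq_min2?_int]
          have hfun : (fun v => (((r :: t).countP (fun w => decide (w ∈ nborsList v)) : Nat) : Int))
              = (fun v => ((nborsList v).map (fun w => cnt.getD w 0)).sum) := by
            funext v
            rw [← countP_eq_sum_counts (nborsList v) (r :: t) (nbors_nodup v)]
            congr 1
            exact (List.map_congr_left (fun w _ => (hinv.getD_eq w))).symm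
          rw [hfun]
          exact min2?_eq_of_sorted _ _ _ _ hinv.1 (hinv.2.1.imp (fun h => pLe_of_pLt h))
            (fun x => (hinv.mem_keys_iff x).symm)
        obtain ⟨vec, hvec⟩ : ∃ vec, PySem.List.min? (r :: t)
            (fun v => (r :: t).countP (fun w => decide (w ∈ nborsList v))) = some vec := by
          rw [min?_nat_int, min?_eq_min2?_int]
          exact min2?_cons_isSome _ _ r t
        have hvmem : vec ∈ r :: t := PySem.List.min?_mem hvec
        rw [hvec, ← hchain, hvec]
        dsimp only
        rw [PySem.List.remove?_eq_some_erase _ _ hvmem]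
        exact ih ((r :: t).erase vec) (takeB cnt vec) vec vec (acc ++ [vec])
          (CntInv_take hinv hvmem)
          (by rw [List.length_erase_of_mem hvmem, hlen]; omega)
      · -- neighbour branch
        have hc : (nborsList cur).filter (fun w => cnt.contains w) ≠ [] := by
          intro h0
          apply hn
          rw [List.eq_nil_iff_forall_not_mem] at h0 ⊢
          intro x hx
          exact h0 x ((hmemiff x).mp hx)
        rw [if_pos hn, if_pos hc]
        have hmin : PySem.List.min2? ((r :: t).filter (fun v => decide (v ∈ nborsList cur)))
              (fun v => pdist v cur) (fun v => pdist v old)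
            = PySem.List.min2? ((nborsList cur).filter (fun w => cnt.contains w))
              (fun v => pdist v cur) (fun v => pdist v old) :=
          min2?_eq_of_sorted _ _ _ _ (hinv.1.filter _)
            ((nbors_sorted cur).filter _) hmemiff
        obtain ⟨vec, hvec⟩ : ∃ vec, PySem.List.min2?
            ((r :: t).filter (fun v => decide (v ∈ nborsList cur)))
              (fun v => pdist v cur) (fun v => pdist v old) = some vec := by
          cases hh : PySem.List.min2? ((r :: t).filter (fun v => decide (v ∈ nborsList cur)))
              (fun v => pdist v cur) (fun v => pdist v old) with
          | none => exact absurd ((min2?_eq_none_iff' _ _ _).mp hh) hn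
          | some m => exact ⟨m, rfl⟩
        have hvmem : vec ∈ r :: t :=
          (List.mem_filter.mp ((min2?_char _ _ _ _ (hinv.1.filter _) hvec).1)).1
        rw [hvec, ← hmin, hvec]
        dsimp only
        rw [PySem.List.remove?_eq_some_erase _ _ hvmem]
        exact ih ((r :: t).erase vec) (takeB cnt vec) vec cur (acc ++ [vec])
          (CntInv_take hinv hvmem)
          (by rw [List.length_erase_of_mem hvmem, hlen]; omega)

-- ---- initialisation ----

lemma ofList_pairwise_aux (s : List (Int × Int)) :
    ∀ (acc : List (Int × Int)), acc.Pairwise pLt →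
    (∀ a ∈ acc, ∀ x ∈ s, pLe a x) → s.Pairwise pLe →
    (s.foldl PySem.Set.add acc).Pairwise pLt := by
  induction s with
  | nil => intro acc hacc _ _; simpa
  | cons x t ih =>
    intro acc hacc hcross hs
    rcases List.pairwise_cons.mp hs with ⟨hxle, hts⟩
    simp only [List.foldl_cons]
    by_cases hmem : x ∈ acc
    · have : PySem.Set.add acc x = acc := by
        unfold PySem.Set.add
        have hc : PySem.Set.contains acc x = true := (PySem.Set.contains_iff acc x).mpr hmem
        rw [if_pos hc]
      rw [this]
      exact ih acc hacc
        (fun a ha y hy => hcross a ha y (List.mem_cons_of_mem _ hy)) hts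
    · have : PySem.Set.add acc x = acc ++ [x] := by
        unfold PySem.Set.add
        have hc : ¬ (PySem.Set.contains acc x = true) :=
          fun h => hmem ((PySem.Set.contains_iff acc x).mp h)
        rw [if_neg hc]
      rw [this]
      refine ih (acc ++ [x]) ?_ ?_ hts
      · rw [List.pairwise_append]
        refine ⟨hacc, List.pairwise_singleton _ _, ?_⟩
        intro a ha y hy
        rw [List.mem_singleton] at hy; subst hy
        exact pLt_of_pLe_of_ne (hcross a ha y List.mem_cons_self)
          (by rintro rfl; exact hmem ha)
      · intro a ha y hy
        rcases List.mem_append.mp ha with ha | ha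
        · exact hcross a ha y (List.mem_cons_of_mem _ hy)
        · rw [List.mem_singleton] at ha; subst ha
          exact hxle y hy

lemma ofList_pairwise (s : List (Int × Int)) (hs : s.Pairwise pLe) :
    (PySem.Set.ofList s).Pairwise pLt := by
  rw [PySem.Set.ofList_eq_foldl]
  exact ofList_pairwise_aux s [] List.Pairwise.nil (by simp) hs

lemma CntInv_init (s : List (Int × Int)) (hs : s.Pairwise pLe) :
    CntInv s (s.foldl (fun d v => d.insert v (d.getD v 0 + 1)) PySem.Dict.empty) := by
  set cnt : PySem.Dict (Int × Int) Int := s.foldl (fun d v => d.insert v (d.getD v 0 + 1)) PySem.Dict.empty with hcnt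
  have hkeys : cnt.keys = PySem.Set.ofList s := by
    rw [hcnt, PySem.Dict.keys_foldl_insert s (fun d x => d.getD x 0 + 1) PySem.Dict.empty,
      PySem.Dict.keys_empty, PySem.Set.ofList_eq_foldl]
    rfl
  have hgetD : ∀ v, cnt.getD v 0 = (s.count v : Int) := by
    intro v
    rw [hcnt, PySem.Dict.getD_foldl_insert_add_one, PySem.Dict.getD_empty]
    simp
  refine ⟨hs, by rw [hkeys]; exact ofList_pairwise s hs, ?_⟩
  intro v
  by_cases hv : v ∈ s
  · have hcont : cnt.contains v = true := by
      rw [PySem.Dict.contains_iff_mem_keys, hkeys, PySem.Set.mem_ofList]; exact hv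
    have hcnt0 : s.count v ≠ 0 := by simpa [List.count_eq_zero] using hv
    obtain ⟨c, hc⟩ : ∃ c, cnt.get? v = some c := by
      cases h : cnt.get? v with
      | none =>
        rw [PySem.Dict.get?_eq_none_iff_contains] at h
        rw [h] at hcont; cases hcont
      | some c => exact ⟨c, rfl⟩
    have hcv : c = (s.count v : Int) := by
      have := hgetD v
      rw [PySem.Dict.getD_eq_get?_getD, hc] at this
      simpa using this
    rw [hc, if_neg hcnt0, hcv]
  · have hcont : cnt.contains v = false := by
      rw [← Bool.not_eq_true, PySem.Dict.contains_iff_mem_keys, hkeys, PySem.Set.mem_ofList]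
      exact hv
    have hcnt0 : s.count v = 0 := by simpa [List.count_eq_zero] using hv
    rw [(PySem.Dict.get?_eq_none_iff_contains cnt v).mpr hcont, if_pos hcnt0]

lemma getLast?_of_max (l : List (Int × Int)) (m : Int × Int)
    (hlt : l.Pairwise pLt) (hm : m ∈ l) (hmax : ∀ y ∈ l, pLe y m) :
    l.getLast? = some m := by
  induction l with
  | nil => cases hm
  | cons x t ih =>
    cases t with
    | nil =>
      rw [List.mem_singleton] at hm
      subst hm
      rfl
    | cons y u =>
      rw [List.getLast?_cons_cons]
      rcases List.pairwise_cons.mp hlt with ⟨hx, ht⟩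
      rcases List.mem_cons.mp hm with rfl | hm
      · exact absurd (hmax y (List.mem_cons_of_mem _ List.mem_cons_self))
          (by have := hx y List.mem_cons_self
              obtain ⟨m1, m2⟩ := m; obtain ⟨y1, y2⟩ := y
              simp [pLt, pLe] at *; omega)
      · exact ih ht hm (fun z hz => hmax z (List.mem_cons_of_mem _ hz))

lemma mem_pLe_getLast (s : List (Int × Int)) (hs : s.Pairwise pLe) (hne : s ≠ [])
    (y : Int × Int) (hy : y ∈ s) : pLe y (s.getLast hne) := by
  have hdec := List.dropLast_concat_getLast hne
  rw [← hdec] at hy hs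
  rcases List.mem_append.mp hy with hy | hy
  · exact (List.pairwise_append.mp hs).2.2 y hy _ List.mem_cons_self
  · rw [List.mem_singleton.mp hy]; exact pLe_refl _

lemma dropLast_eq_erase_getLast (s : List (Int × Int)) (hs : s.Pairwise pLe) (hne : s ≠ []) :
    s.dropLast = s.erase (s.getLast hne) := by
  have hmem : s.getLast hne ∈ s := List.getLast_mem hne
  have hperm : List.Perm s.dropLast (s.erase (s.getLast hne)) := by
    have h1 : List.Perm s (s.getLast hne :: s.erase (s.getLast hne)) := List.perm_cons_erase hmem
    have h2 : List.Perm s (s.getLast hne :: s.dropLast) := by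
      conv_lhs => rw [← List.dropLast_concat_getLast hne]
      exact List.perm_append_singleton _ _
    exact (h2.symm.trans h1).cons_inv
  exact List.eq_of_perm_of_sorted
    (fun a b _ _ hab hba => pLe_antisymm hab hba)
    (List.Pairwise.sublist (List.dropLast_sublist s) hs)
    (List.Pairwise.sublist List.erase_sublist hs) hperm

theorem linesort_spec : Claim_equal_linesort := by
  intro line start _ hpre
  show linesort line start = linesort_alt line start
  simp only [linesort, linesort_alt]
  rw [sortKeyLtA_eq_pairLt]
  set s := line.foldl (fun acc x => PySem.List.insertBy pairLt x acc) [] with hseq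
  have hsorted : s.Pairwise pLe := foldl_insertBy_sorted line [] List.Pairwise.nil
  have hperm : List.Perm s line := by
    have := foldl_insertBy_perm line []
    rwa [List.append_nil] at this
  have hsne : s ≠ [] := by
    intro h0
    exact hpre (List.Perm.eq_nil (h0 ▸ hperm.symm))
  have hpop : PySem.List.pop? s = some (s.getLast hsne, s.dropLast) := by
    conv_lhs => rw [← List.dropLast_concat_getLast hsne]
    exact PySem.List.pop?_last _ _
  rw [hpop]
  set cnt : PySem.Dict (Int × Int) Int :=
    s.foldl (fun d v => d.insert v (d.getD v 0 + 1)) PySem.Dict.empty with hcnt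
  have hinv : CntInv s cnt := CntInv_init s hsorted
  have hmax : cnt.keys.getLast? = some (s.getLast hsne) :=
    getLast?_of_max cnt.keys (s.getLast hsne) hinv.2.1
      ((hinv.mem_keys_iff _).mpr (List.getLast_mem hsne))
      (fun y hy => mem_pLe_getLast s hsorted hsne y ((hinv.mem_keys_iff y).mp hy))
  rw [hmax]
  have hlen : line.length - 1 = s.dropLast.length := by
    have h1 : s.length = line.length := hperm.length_eq
    have h2 : s.dropLast.length = s.length - 1 := List.length_dropLast
    omega
  rw [hlen]
  have hinv' : CntInv s.dropLast (takeB cnt (s.getLast hsne)) := by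
    rw [dropLast_eq_erase_getLast s hsorted hsne]
    exact CntInv_take hinv (List.getLast_mem hsne)
  exact loop_eq s.dropLast.length s.dropLast (takeB cnt (s.getLast hsne)) _ _ _ hinv' rfl
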